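-- pv_equiv track=rewrite | github.com/marioyoungmin-lgtm/mario | backend/app/ai_generator.py | _prioritize_pillars_for_reduced_load
-- ===== SOURCE A (Python) =====
-- PILLARS = ["Cognitive", "Physical", "Language", "Character", "Creativity"]
--
-- def _prioritize_pillars_for_reduced_load(
--     low_pillar: str | None,
--     parent_priority: str,
--     max_tasks: int,
-- ) -> list[str]:
--     """Select which pillars remain when reducing load, preserving personalization."""
--     ordered: list[str] = []
--
--     # Keep low-performing pillar in rotation first when applicable.
--     if low_pillar in PILLARS:
--         ordered.append(low_pillar)
--
--     # Map parent priority text to a likely pillar and keep it near front.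
--     priority_map = {
--         "study": "Cognitive",
--         "fitness": "Physical",
--         "exercise": "Physical",
--         "language": "Language",
--         "communication": "Language",
--         "behavior": "Character",
--         "discipline": "Character",
--         "creative": "Creativity",
--         "art": "Creativity",
--     }
--     normalized_priority = parent_priority.lower()
--     matched = next((v for k, v in priority_map.items() if k in normalized_priority), None)
--     if matched and matched not in ordered:
--         ordered.append(matched)
--
--     for pillar in PILLARS:
--         if pillar not in ordered:
--             ordered.append(pillar)
--
--     return ordered[:max_tasks]
-- ===== SOURCE B (Python) =====
-- PILLARS = ["Cognitive", "Physical", "Language", "Character", "Creativity"]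
--
-- def _prioritize_pillars_for_reduced_load(low_pillar, parent_priority, max_tasks):
--     """Rank-and-stable-sort formulation: rank 0 = kept low pillar, 1 = priority match, 2 = rest."""
--     priority_map = {
--         "study": "Cognitive",
--         "fitness": "Physical",
--         "exercise": "Physical",
--         "language": "Language",
--         "communication": "Language",
--         "behavior": "Character",
--         "discipline": "Character",
--         "creative": "Creativity",
--         "art": "Creativity",
--     }
--     normalized_priority = parent_priority.lower()
--     matched = next((v for k, v in priority_map.items() if k in normalized_priority), None)
--     low = low_pillar if low_pillar in PILLARS else None
--     rank = lambda pillar: 0 if pillar == low else (1 if pillar == matched else 2)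
--     return sorted(PILLARS, key=rank)[:max_tasks]
-- ===== Notes on version B (the rewrite author's own statement) =====
-- stated objective: alternative
-- what changed: Replaces the incremental append-with-membership dedup over an 'ordered' list by a rank function (0 = kept low pillar, 1 = priority-matched pillar, 2 = rest) and a single stable sort of PILLARS, then the same slice.
import Mathlib
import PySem

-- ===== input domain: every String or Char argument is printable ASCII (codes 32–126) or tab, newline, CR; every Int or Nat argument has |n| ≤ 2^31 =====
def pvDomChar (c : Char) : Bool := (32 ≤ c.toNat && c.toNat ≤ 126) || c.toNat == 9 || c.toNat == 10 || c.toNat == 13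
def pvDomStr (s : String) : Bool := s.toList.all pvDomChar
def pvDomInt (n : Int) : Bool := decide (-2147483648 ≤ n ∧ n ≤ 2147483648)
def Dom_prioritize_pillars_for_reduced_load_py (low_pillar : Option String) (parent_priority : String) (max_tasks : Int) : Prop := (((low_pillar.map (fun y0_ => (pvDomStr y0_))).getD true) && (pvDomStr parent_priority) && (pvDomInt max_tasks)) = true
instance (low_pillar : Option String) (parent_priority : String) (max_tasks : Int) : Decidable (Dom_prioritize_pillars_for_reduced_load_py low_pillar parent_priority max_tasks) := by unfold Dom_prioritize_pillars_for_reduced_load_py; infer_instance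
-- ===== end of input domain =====

-- B replaces A's incremental append-with-membership dedup by a rank function over PILLARS
-- and one stable sort followed by the same slice (objective: alternative decomposition).

-- ===== PORT A =====
def pvPillars : List String := ["Cognitive", "Physical", "Language", "Character", "Creativity"]

def pvPriorityMap : List (String × String) :=
  [("study", "Cognitive"), ("fitness", "Physical"), ("exercise", "Physical"),
   ("language", "Language"), ("communication", "Language"), ("behavior", "Character"),
   ("discipline", "Character"), ("creative", "Creativity"), ("art", "Creativity")]

-- matched = next((v for k, v in priority_map.items() if k in parent_priority.lower()), None)
-- (identical line in A and B, so both ports call this helper)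
def pvMatched (parent_priority : String) : Option String :=
  (pvPriorityMap.find? (fun kv => PySem.Str.isIn kv.1 (PySem.Str.lower parent_priority))).map
    (fun kv => kv.2)

def prioritize_pillars_for_reduced_load_py (low_pillar : Option String)
    (parent_priority : String) (max_tasks : Int) : List String :=
  -- if low_pillar in PILLARS: ordered.append(low_pillar)
  let ordered : List String :=
    match low_pillar with
    | some s => if pvPillars.contains s then [s] else []
    | none => []
  let matched := pvMatched parent_priority
  -- if matched and matched not in ordered: ordered.append(matched)
  let ordered :=
    match matched with
    | some v => if v != "" && !(ordered.contains v) then ordered ++ [v] else ordered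
    | none => ordered
  -- for pillar in PILLARS: if pillar not in ordered: ordered.append(pillar)
  let ordered := pvPillars.foldl (fun acc p => if acc.contains p then acc else acc ++ [p]) ordered
  PySem.List.slice ordered none (some max_tasks)

-- ===== PORT B =====
def prioritize_pillars_for_reduced_load_py_alt (low_pillar : Option String)
    (parent_priority : String) (max_tasks : Int) : List String :=
  let matched := pvMatched parent_priority
  -- low = low_pillar if low_pillar in PILLARS else None
  let low : Option String :=
    match low_pillar with
    | some s => if pvPillars.contains s then some s else none
    | none => none
  -- rank = lambda pillar: 0 if pillar == low else (1 if pillar == matched else 2)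
  let rank : String → Int := fun p => if some p == low then 0 else if some p == matched then 1 else 2
  PySem.List.slice (PySem.List.sorted pvPillars rank false) none (some max_tasks)

-- ===== PRECONDITION & SPEC =====
def Spec_prioritize_pillars_for_reduced_load_py (low_pillar : Option String) (parent_priority : String) (max_tasks : Int) (out : List String) : Prop := out = prioritize_pillars_for_reduced_load_py_alt low_pillar parent_priority max_tasks
instance (low_pillar : Option String) (parent_priority : String) (max_tasks : Int) (out : List String) : Decidable (Spec_prioritize_pillars_for_reduced_load_py low_pillar parent_priority max_tasks out) := by unfold Spec_prioritize_pillars_for_reduced_load_py; infer_instance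

-- ===== CLAIM (what is proved, stated in full; the proofs are below) =====
def Claim_equal_prioritize_pillars_for_reduced_load_py : Prop := ∀ (low_pillar : Option String) (parent_priority : String) (max_tasks : Int), Dom_prioritize_pillars_for_reduced_load_py low_pillar parent_priority max_tasks → Spec_prioritize_pillars_for_reduced_load_py low_pillar parent_priority max_tasks (prioritize_pillars_for_reduced_load_py low_pillar parent_priority max_tasks)

-- ===== LEMMAS AND PROOFS =====

-- matched is None or one of the five pillar names
theorem pvMatched_cases (pp : String) :
    pvMatched pp = none ∨ pvMatched pp = some "Cognitive" ∨ pvMatched pp = some "Physical" ∨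
    pvMatched pp = some "Language" ∨ pvMatched pp = some "Character" ∨
    pvMatched pp = some "Creativity" := by
  unfold pvMatched
  cases hf : pvPriorityMap.find? (fun kv => PySem.Str.isIn kv.1 (PySem.Str.lower pp)) with
  | none => simp
  | some kv =>
    have hmem : kv ∈ pvPriorityMap := List.mem_of_find?_eq_some hf
    simp only [pvPriorityMap, List.mem_cons, List.not_mem_nil, or_false] at hmem
    rcases hmem with h|h|h|h|h|h|h|h|h <;> subst h <;> simp

theorem pvMain (lp : Option String) (pp : String) (mt : Int) :
    prioritize_pillars_for_reduced_load_py lp pp mt =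
    prioritize_pillars_for_reduced_load_py_alt lp pp mt := by
  unfold prioritize_pillars_for_reduced_load_py prioritize_pillars_for_reduced_load_py_alt
  have hm := pvMatched_cases pp
  rcases lp with _ | s
  · rcases hm with h|h|h|h|h|h <;> rw [h] <;>
      exact congrArg (fun l => PySem.List.slice l none (some mt)) (by decide)
  · by_cases hs : pvPillars.contains s
    · have hs5 : s = "Cognitive" ∨ s = "Physical" ∨ s = "Language" ∨ s = "Character" ∨
          s = "Creativity" := by
        simpa [pvPillars] using hs
      rcases hs5 with h5|h5|h5|h5|h5 <;> subst h5 <;>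
        rcases hm with h|h|h|h|h|h <;> rw [h] <;>
        exact congrArg (fun l => PySem.List.slice l none (some mt)) (by decide)
    · simp only [hs, if_neg, Bool.false_eq_true, not_false_eq_true]
      rcases hm with h|h|h|h|h|h <;> rw [h] <;>
      exact congrArg (fun l => PySem.List.slice l none (some mt)) (by decide)

-- ===== VERDICT (by name: the statement is the Claim_ definition above) =====
theorem prioritize_pillars_for_reduced_load_py_spec : Claim_equal_prioritize_pillars_for_reduced_load_py := by
  intro lp pp mt _
  unfold Spec_prioritize_pillars_for_reduced_load_py
  exact pvMain lp pp mt
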